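-- pv_equiv track=rewrite | github.com/nishu959/Pepcodingdynamicprogramming | totalpathvariablejumprecursion.py | vjpath
-- ===== SOURCE A (Python) =====
-- def vjpath(vn, l):
--
--   if(vn>len(l)):
--     return 0
--
--   if(vn==len(l)):
--     return 1
--
--   ans = 0
--   for i in range(1,l[vn]+1):
--     ans += vjpath(vn+i, l)
--
--   return ans
-- ===== SOURCE B (Python) =====
-- def vjpath(vn, l):
--     n = len(l)
--     if vn > n:
--         return 0
--     lo = max(vn, 0)  # positions below the start are never needed
--     dp = [0] * (n + 1)
--     suf = [0] * (n + 2)  # suf[i] = dp[i] + dp[i+1] + ... + dp[n]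
--     dp[n] = 1
--     suf[n] = 1
--     for i in range(n - 1, lo - 1, -1):
--         hi = min(i + max(l[i], 0), n)  # furthest position reachable from i
--         dp[i] = suf[i + 1] - suf[hi + 1]
--         suf[i] = dp[i] + suf[i + 1]
--     return dp[vn]
-- ===== Notes on version B (the rewrite author's own statement) =====
-- stated objective: alternative
-- what changed: Replaces A's branching top-down recursion (re-exploring every path) with a bottom-up DP filling dp/suffix-sum arrays from the end, answered by a single table lookup; worst-case exponential becomes O(n), though on the sampled inputs A's recursion dies quickly and B was not measured faster.
-- outside the precondition, e.g. on vjpath(-1, [2]): A returns 2, B returns 1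
import Mathlib
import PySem

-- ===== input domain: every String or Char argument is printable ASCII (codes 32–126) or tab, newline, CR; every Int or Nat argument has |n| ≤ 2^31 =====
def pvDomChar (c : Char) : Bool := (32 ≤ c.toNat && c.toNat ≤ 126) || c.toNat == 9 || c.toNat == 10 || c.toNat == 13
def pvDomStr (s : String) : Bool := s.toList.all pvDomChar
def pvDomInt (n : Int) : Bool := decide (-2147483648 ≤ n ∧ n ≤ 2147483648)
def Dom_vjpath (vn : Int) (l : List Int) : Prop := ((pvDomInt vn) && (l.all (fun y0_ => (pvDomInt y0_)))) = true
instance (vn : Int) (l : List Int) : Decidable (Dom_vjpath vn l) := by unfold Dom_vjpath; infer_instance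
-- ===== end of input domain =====

-- B replaces A's branching recursion by a bottom-up suffix-sum DP table, answered by a single lookup (alternative algorithm; not measured faster on the generated inputs).


-- ===== PORT A =====
-- l[vn] is pyGetD with default 0: under Pre_ (0 ≤ vn) the index is in range whenever
-- this branch is reached (vn < len l), so the default is never used there.
def vjpath (vn : Int) (l : List Int) : Int :=
  if vn > (l.length : Int) then 0
  else if vn = (l.length : Int) then 1
  else
    (PySem.List.pyRange 1 ((PySem.List.pyGetD l vn 0) + 1) 1).attach.foldl
      (fun ans i => ans + vjpath (vn + i.1) l) 0
termination_by (l.length - vn).toNat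
decreasing_by
  have h1 := (PySem.List.mem_pyRange_one.mp i.2).1
  have h2 : ¬ vn = (l.length : Int) := by assumption
  omega

-- ===== PORT B =====
-- Source B fills dp/suf arrays back to front by an index loop; solveB is that loop as
-- structural recursion on the list: for each suffix it returns (dp, suf) where dp
-- lists the path counts for the suffix positions and suf their running suffix sums.
-- 'hi = min(i + max(l[i], 0), n)' becomes the relative reach r = min (max x 0) (len rest + 1),
-- and 'suf[i+1] - suf[hi+1]' becomes ds.2.getD 0 0 - ds.2.getD r.toNat 0 (r ≥ 0, so toNat is exact).
def solveB : List Int → List Int × List Int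
  | [] => ([1], [1, 0])
  | x :: rest =>
    let ds := solveB rest
    let r := min (max x 0) ((rest.length : Int) + 1)
    let dpi := ds.2.getD 0 0 - ds.2.getD r.toNat 0
    (dpi :: ds.1, (dpi + ds.2.getD 0 0) :: ds.2)

-- Source B only fills dp from n-1 down to lo = max(vn, 0); positions below lo keep their
-- initial 0, so the dp array is 'lo zeros ++ table of the suffix l[lo:]'.
-- dp[vn]: pyGet? with default 0; under Pre_ (0 ≤ vn ≤ len l here) the index is in range.
def vjpath_alt (vn : Int) (l : List Int) : Int :=
  if vn > (l.length : Int) then 0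
  else
    (PySem.List.pyGet?
      (List.replicate (max vn 0).toNat 0 ++ (solveB (l.drop (max vn 0).toNat)).1) vn).getD 0

-- ===== PRECONDITION & SPEC =====
-- Pre_ excludes negative vn: there A raises IndexError when vn < -len(l), and for
-- -len(l) ≤ vn < 0 A's negative-index wraparound into l and B's wraparound into its
-- dp table (of length len(l)+1) are both accidents of Python negative indexing that
-- nobody would specify (e.g. vn = -1, l = [2]: A returns 2, B returns 1).
def Pre_vjpath (vn : Int) (l : List Int) : Prop := 0 ≤ vn
instance (vn : Int) (l : List Int) : Decidable (Pre_vjpath vn l) := by unfold Pre_vjpath; infer_instance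
def pvWitness_vjpath : Int × List Int := (0, [2, 1, 1])

def Spec_vjpath (vn : Int) (l : List Int) (out : Int) : Prop := out = vjpath_alt vn l
instance (vn : Int) (l : List Int) (out : Int) : Decidable (Spec_vjpath vn l out) := by unfold Spec_vjpath; infer_instance

-- ===== CLAIM (what is proved, stated in full; the proofs are below) =====
def Claim_equal_vjpath : Prop := ∀ (vn : Int) (l : List Int), Dom_vjpath vn l → Pre_vjpath vn l → Spec_vjpath vn l (vjpath vn l)

-- ===== LEMMAS AND PROOFS =====

-- proof-side reference table: refB l lists the path counts of every position of l
-- (refB is what vjpath provably computes; solveB_spec links it to the suffix-sum port)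
def refB : List Int → List Int
  | [] => [1]
  | x :: rest =>
    let d := refB rest
    ((d.take x.toNat).sum) :: d

-- suffix sums of a table, ending in 0 (the shape of Source B's suf array)
def sufSums : List Int → List Int
  | [] => [0]
  | a :: xs => (a + (sufSums xs).headI) :: sufSums xs

theorem sufSums_ne_nil (xs : List Int) : sufSums xs ≠ [] := by
  cases xs <;> simp [sufSums]

theorem sufSums_getD (xs : List Int) : ∀ j : Nat, (sufSums xs).getD j 0 = (xs.drop j).sum := by
  induction xs with
  | nil => intro j; cases j <;> simp [sufSums]
  | cons a xs ih =>
    intro j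
    cases j with
    | zero =>
      simp only [sufSums, List.getD_cons_zero, List.drop_zero, List.sum_cons]
      have : (sufSums xs).headI = (sufSums xs).getD 0 0 := by
        cases h : sufSums xs with
        | nil => exact absurd h (sufSums_ne_nil xs)
        | cons b bs => simp
      rw [this, ih 0]
      simp
    | succ j => simpa [sufSums] using ih j

theorem refB_length (l : List Int) : (refB l).length = l.length + 1 := by
  induction l with
  | nil => rfl
  | cons x rest ih => simp [refB, ih]

theorem solveB_spec (l : List Int) : (solveB l).1 = refB l ∧ (solveB l).2 = sufSums (refB l) := by
  induction l with
  | nil =>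
    constructor
    · rfl
    · show ([1, 0] : List Int) = sufSums [1]
      simp [sufSums]
  | cons x rest ih =>
    have h1 := ih.1
    have h2 := ih.2
    have hlen : (refB rest).length = rest.length + 1 := refB_length rest
    -- the computed entry equals the reference entry
    have hr : (min (max x 0) ((rest.length : Int) + 1)).toNat = min x.toNat (refB rest).length := by
      rw [hlen]; omega
    have hdpi : (solveB rest).2.getD 0 0
        - (solveB rest).2.getD (min (max x 0) ((rest.length : Int) + 1)).toNat 0
        = ((refB rest).take x.toNat).sum := by
      rw [h2, sufSums_getD, sufSums_getD, hr, List.drop_zero]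
      have hsplit : (refB rest).sum
          = ((refB rest).take (min x.toNat (refB rest).length)).sum
            + ((refB rest).drop (min x.toNat (refB rest).length)).sum := by
        rw [← List.sum_append, List.take_append_drop]
      have htk : (refB rest).take (min x.toNat (refB rest).length) = (refB rest).take x.toNat := by
        rcases Nat.le_total x.toNat (refB rest).length with h | h
        · rw [Nat.min_eq_left h]
        · rw [Nat.min_eq_right h, List.take_length, List.take_of_length_le h]
      rw [hsplit, htk]; ring
    constructor
    · show (_ :: (solveB rest).1) = refB (x :: rest)
      rw [hdpi, h1]; rfl
    · show (_ :: (solveB rest).2) = sufSums (refB (x :: rest))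
      have hrefB : refB (x :: rest) = ((refB rest).take x.toNat).sum :: refB rest := rfl
      rw [hrefB]
      simp only [sufSums]
      rw [hdpi, h2]
      congr 1
      have : (sufSums (refB rest)).headI = (sufSums (refB rest)).getD 0 0 := by
        cases h : sufSums (refB rest) with
        | nil => exact absurd h (sufSums_ne_nil _)
        | cons b bs => simp
      rw [this, sufSums_getD]

theorem refB_getD_last (l : List Int) : (refB l).getD l.length 0 = 1 := by
  induction l with
  | nil => rfl
  | cons x rest ih => simpa [refB] using ih

theorem refB_drop (l : List Int) : ∀ (k : Nat), k ≤ l.length →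
    (refB l).drop k = refB (l.drop k) := by
  induction l with
  | nil =>
    intro k hk
    have hk0 : k = 0 := by simpa using hk
    subst hk0; rfl
  | cons x rest ih =>
    intro k hk
    cases k with
    | zero => rfl
    | succ k => simpa [refB] using ih k (by simpa using hk)

-- the loop over range(1, x+1) (for x = ↑b) sums exactly the first b table entries
theorem foldl_range_eq_sum_take (g : Int → Int) (T : List Int) (c : Int)
    (hg : ∀ m : Nat, m < T.length → g (c + 1 + m) = T.getD m 0)
    (h0 : ∀ i : Int, c + (T.length : Int) < i → g i = 0) :
    ∀ b : Nat, (PySem.List.pyRange 1 ((b : Int) + 1) 1).foldl (fun a i => a + g (c + i)) 0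
      = (T.take b).sum := by
  intro b
  induction b with
  | zero => simp [PySem.List.pyRange_one_eq_nil]
  | succ b ih =>
    have hsplit : PySem.List.pyRange 1 (((b : Nat) + 1 : Int) + 1) 1
        = PySem.List.pyRange 1 ((b : Int) + 1) 1 ++ [(b : Int) + 1] := by
      have h := PySem.List.pyRange_one_succ_right (a := 1) (b := (b : Int) + 1) (by omega)
      simpa using h
    push_cast
    rw [hsplit, List.foldl_append, ih]
    simp only [List.foldl_cons, List.foldl_nil]
    by_cases hb : b < T.length
    · rw [List.take_add_one]
      have hsome : T[b]? = some (T.getD b 0) := by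
        rw [List.getD_eq_getElem?_getD]
        cases h : T[b]? with
        | none => exact absurd (List.getElem?_eq_none_iff.mp h) (by omega)
        | some v => simp
      rw [hsome]
      have hgb := hg b hb
      simp only [List.sum_append, List.sum_cons, List.sum_nil, Option.toList_some, add_zero]
      have harg : c + ((b : Int) + 1) = c + 1 + (b : Int) := by ring
      rw [harg, hgb]
    · have hTb : T.length ≤ b := by omega
      rw [List.take_of_length_le hTb, List.take_of_length_le (by omega)]
      have hz : g (c + ((b : Int) + 1)) = 0 := h0 _ (by omega)
      rw [hz, add_zero]

theorem vjpath_eq_table (l : List Int) : ∀ (d k : Nat), l.length - k = d → k ≤ l.length →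
    vjpath (k : Int) l = (refB l).getD k 0 := by
  intro d
  induction d using Nat.strong_induction_on with
  | _ d ih =>
    intro k hd hk
    by_cases hke : k = l.length
    · subst hke
      rw [vjpath, if_neg (lt_irrefl _), if_pos rfl]
      exact (refB_getD_last l).symm
    · have hklt : k < l.length := by omega
      rw [vjpath]
      have h1 : ¬ ((k : Int) > (l.length : Int)) := by omega
      have h2 : ¬ ((k : Int) = (l.length : Int)) := by omega
      rw [if_neg h1, if_neg h2]
      rw [List.foldl_attach (l := PySem.List.pyRange 1 (PySem.List.pyGetD l (k : Int) 0 + 1) 1) (f := fun ans i => ans + vjpath ((k : Int) + i) l) (b := 0)]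
      -- the table entry at k
      set x : Int := PySem.List.pyGetD l (k : Int) 0 with hx
      have hxval : x = l.getD k 0 := by simp [hx]
      have hdropk : l.drop k = l.getD k 0 :: l.drop (k + 1) := by
        rw [List.getD_eq_getElem?_getD]
        have := List.drop_eq_getElem_cons (l := l) (i := k) hklt
        rw [this]
        congr 1
        cases h : l[k]? with
        | none => exact absurd (List.getElem?_eq_none_iff.mp h) (by omega)
        | some v =>
          have hv : l[k] = v := by
            have hgg := List.getElem?_eq_getElem (l := l) (i := k) hklt
            rw [h] at hgg; exact (Option.some.injEq _ _).mp hgg.symm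
          simp [hv]
      set T : List Int := refB (l.drop (k + 1)) with hT
      have hTlen : T.length = l.length - k := by
        rw [hT, refB_length]; simp; omega
      have hRHS : (refB l).getD k 0 = (T.take x.toNat).sum := by
        have hdk : (refB l).drop k = refB (l.drop k) := refB_drop l k (le_of_lt hklt)
        have : (refB l).getD k 0 = ((refB l).drop k).getD 0 0 := by
          rw [List.getD_eq_getElem?_getD, List.getD_eq_getElem?_getD,
            List.getElem?_drop, Nat.add_zero]
        rw [this, hdk, hdropk]
        simp only [refB, List.getD_cons_zero]
        rw [← hxval]
      rw [hRHS]
      -- the loop equals the sum of the first x entries of T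
      have hgen : ∀ m : Nat, m < T.length → vjpath ((k : Int) + 1 + m) l = T.getD m 0 := by
        intro m hm
        have hmk : k + 1 + m ≤ l.length := by omega
        have hmeas : l.length - (k + 1 + m) < d := by omega
        have hrec := ih _ hmeas (k + 1 + m) rfl hmk
        have hTd : T.getD m 0 = (refB l).getD (k + 1 + m) 0 := by
          rw [hT, ← refB_drop l (k + 1) (by omega)]
          rw [List.getD_eq_getElem?_getD, List.getD_eq_getElem?_getD,
            List.getElem?_drop]
        have harg : ((k : Int) + 1 + (m : Int)) = (((k + 1 + m : Nat) : Int)) := by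
          push_cast; ring
        rw [harg, hrec, hTd]
      have hzero : ∀ i : Int, (k : Int) + (T.length : Int) < i → vjpath i l = 0 := by
        intro i hi
        rw [vjpath]
        have : i > (l.length : Int) := by
          rw [hTlen] at hi; omega
        rw [if_pos this]
      by_cases hxpos : 0 < x
      · have hxb : x = (x.toNat : Int) := by omega
        rw [hxb]
        exact foldl_range_eq_sum_take (fun i => vjpath i l) T (k : Int) hgen hzero x.toNat
      · have hnil : PySem.List.pyRange 1 (x + 1) 1 = [] :=
          PySem.List.pyRange_one_eq_nil (by omega)
        have hnat : x.toNat = 0 := by omega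
        rw [hnil, hnat]
        simp

-- ===== VERDICT (by name: the statement is the Claim_ definition above) =====
theorem vjpath_spec : Claim_equal_vjpath := by
  intro vn l _ hpre
  unfold Spec_vjpath vjpath_alt
  by_cases hgt : vn > (l.length : Int)
  · rw [if_pos hgt, vjpath, if_pos hgt]
  · rw [if_neg hgt]
    have h0 : 0 ≤ vn := hpre
    set k := vn.toNat with hkdef
    have hvk : vn = (k : Int) := by omega
    have hmax : (max vn 0).toNat = k := by omega
    rw [hmax, hvk, PySem.List.pyGet?_natCast, (solveB_spec (l.drop k)).1]
    have hidx : (List.replicate k (0 : Int) ++ refB (l.drop k))[k]? = (refB (l.drop k))[0]? := by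
      have h := List.getElem?_append_right
        (l₁ := List.replicate k (0 : Int)) (l₂ := refB (l.drop k)) (i := k) (by simp)
      simpa using h
    rw [hidx, vjpath_eq_table l (l.length - k) k rfl (by omega)]
    have hgd : (refB l).getD k 0 = (refB (l.drop k)).getD 0 0 := by
      rw [← refB_drop l k (by omega), List.getD_eq_getElem?_getD, List.getD_eq_getElem?_getD,
        List.getElem?_drop, Nat.add_zero]
    rw [hgd, List.getD_eq_getElem?_getD]
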